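-- pv_equiv track=rewrite | github.com/davidkern13/multi-agent-rag-gpt | retrieval/metadata_extractor.py | extract_doc_type
-- ===== SOURCE A (Python) =====
-- def extract_doc_type(text: str) -> str:
--     """
--     Determine document type based on content.
--     """
--     text_lower = text.lower()
--
--     # SEC Filing types
--     if any(term in text_lower for term in ["10-k", "annual report", "form 10-k"]):
--         return "sec_10k"
--     elif any(term in text_lower for term in ["10-q", "quarterly report", "form 10-q"]):
--         return "sec_10q"
--     elif any(term in text_lower for term in ["8-k", "current report", "form 8-k"]):
--         return "sec_8k"
--     elif any(term in text_lower for term in ["proxy", "def 14a"]):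
--         return "sec_proxy"
--
--     # Financial sections
--     elif any(term in text_lower for term in ["risk factor", "risks"]):
--         return "risk_factors"
--     elif any(term in text_lower for term in ["management discussion", "md&a", "management's discussion"]):
--         return "mda_section"
--     elif any(term in text_lower for term in ["financial statement", "balance sheet", "income statement"]):
--         return "financial_statements"
--     elif any(term in text_lower for term in ["notes to", "footnote"]):
--         return "financial_notes"
--     elif any(term in text_lower for term in ["business overview", "description of business"]):
--         return "business_description"
--     elif any(term in text_lower for term in ["forward-looking", "outlook", "guidance"]):
--         return "forward_looking"
--
--     return "general_section"
-- ===== SOURCE B (Python) =====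
-- # Single left-to-right scan over text positions: at each position, prefix-match
-- # every keyword (flat keyword -> priority table) and keep the smallest priority
-- # seen; the final label is looked up in a priority-indexed table.
-- _TERMS = {
--     "10-k": 0, "annual report": 0, "form 10-k": 0,
--     "10-q": 1, "quarterly report": 1, "form 10-q": 1,
--     "8-k": 2, "current report": 2, "form 8-k": 2,
--     "proxy": 3, "def 14a": 3,
--     "risk factor": 4, "risks": 4,
--     "management discussion": 5, "md&a": 5, "management's discussion": 5,
--     "financial statement": 6, "balance sheet": 6, "income statement": 6,
--     "notes to": 7, "footnote": 7,
--     "business overview": 8, "description of business": 8,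
--     "forward-looking": 9, "outlook": 9, "guidance": 9,
-- }
--
-- _LABELS = [
--     "sec_10k", "sec_10q", "sec_8k", "sec_proxy",
--     "risk_factors", "mda_section", "financial_statements", "financial_notes",
--     "business_description", "forward_looking", "general_section",
-- ]
--
--
-- def extract_doc_type(text: str) -> str:
--     t = text.lower()
--     best = len(_LABELS) - 1  # priority of "general_section"
--     for i in range(len(t)):
--         for term, p in _TERMS.items():
--             if p < best and t.startswith(term, i):
--                 best = p
--     return _LABELS[best]
-- ===== Notes on version B (the rewrite author's own statement) =====
-- stated objective: alternative
-- what changed: Instead of an ordered if/elif chain of substring tests, B makes one left-to-right scan over the text positions, prefix-matching every keyword from a flat keyword-to-priority dict at each position and keeping the minimum priority seen; the label is then looked up in a priority-indexed table.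
import Mathlib
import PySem

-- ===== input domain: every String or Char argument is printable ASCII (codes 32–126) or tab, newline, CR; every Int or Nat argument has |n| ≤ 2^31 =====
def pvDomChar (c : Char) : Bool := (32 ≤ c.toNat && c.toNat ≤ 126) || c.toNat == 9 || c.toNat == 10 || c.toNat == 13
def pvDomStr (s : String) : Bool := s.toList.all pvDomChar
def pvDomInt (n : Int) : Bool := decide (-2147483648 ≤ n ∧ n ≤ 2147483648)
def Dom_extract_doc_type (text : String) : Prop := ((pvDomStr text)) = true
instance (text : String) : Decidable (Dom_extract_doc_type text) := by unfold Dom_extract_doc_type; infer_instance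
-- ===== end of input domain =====

-- B replaces A's ordered if/elif substring chain by a single left-to-right scan over
-- text positions that prefix-matches a flat keyword→priority table and keeps the
-- minimum priority (alternative algorithm, same asymptotic cost).

-- ===== PORT A =====
def extract_doc_type (text : String) : String :=
  let text_lower := PySem.Str.lower text
  if ["10-k", "annual report", "form 10-k"].any (fun term => PySem.Str.isIn term text_lower) then
    "sec_10k"
  else if ["10-q", "quarterly report", "form 10-q"].any (fun term => PySem.Str.isIn term text_lower) then
    "sec_10q"
  else if ["8-k", "current report", "form 8-k"].any (fun term => PySem.Str.isIn term text_lower) then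
    "sec_8k"
  else if ["proxy", "def 14a"].any (fun term => PySem.Str.isIn term text_lower) then
    "sec_proxy"
  else if ["risk factor", "risks"].any (fun term => PySem.Str.isIn term text_lower) then
    "risk_factors"
  else if ["management discussion", "md&a", "management's discussion"].any (fun term => PySem.Str.isIn term text_lower) then
    "mda_section"
  else if ["financial statement", "balance sheet", "income statement"].any (fun term => PySem.Str.isIn term text_lower) then
    "financial_statements"
  else if ["notes to", "footnote"].any (fun term => PySem.Str.isIn term text_lower) then
    "financial_notes"
  else if ["business overview", "description of business"].any (fun term => PySem.Str.isIn term text_lower) then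
    "business_description"
  else if ["forward-looking", "outlook", "guidance"].any (fun term => PySem.Str.isIn term text_lower) then
    "forward_looking"
  else
    "general_section"

-- ===== PORT B =====
-- the _TERMS dict of Source B (keyword → priority), in insertion order
def pvTERMS : List (String × Nat) :=
  [ ("10-k", 0), ("annual report", 0), ("form 10-k", 0),
    ("10-q", 1), ("quarterly report", 1), ("form 10-q", 1),
    ("8-k", 2), ("current report", 2), ("form 8-k", 2),
    ("proxy", 3), ("def 14a", 3),
    ("risk factor", 4), ("risks", 4),
    ("management discussion", 5), ("md&a", 5), ("management's discussion", 5),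
    ("financial statement", 6), ("balance sheet", 6), ("income statement", 6),
    ("notes to", 7), ("footnote", 7),
    ("business overview", 8), ("description of business", 8),
    ("forward-looking", 9), ("outlook", 9), ("guidance", 9) ]

def pvLABELS : List String :=
  [ "sec_10k", "sec_10q", "sec_8k", "sec_proxy",
    "risk_factors", "mda_section", "financial_statements", "financial_notes",
    "business_description", "forward_looking", "general_section" ]

-- the position loop of Source B: for i in range(len(t)): for term, p in _TERMS.items(): …
def pvScanBest (t : List Char) : Nat :=
  (List.range t.length).foldl
    (fun best i =>
      pvTERMS.foldl
        (fun best tp =>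
          -- Python `p < best and t.startswith(term, i)`: for 0 ≤ i < len(t),
          -- t.startswith(term, i) is exactly a prefix test on t dropped at i
          if tp.2 < best ∧ PySem.Chars.startswith (t.drop i) tp.1.toList then tp.2 else best)
        best)
    (pvLABELS.length - 1)

def extract_doc_type_alt (text : String) : String :=
  pvLABELS.getD (pvScanBest (PySem.Str.lower text).toList) ""

-- ===== PRECONDITION & SPEC =====
def Spec_extract_doc_type (text : String) (out : String) : Prop := out = extract_doc_type_alt text
instance (text : String) (out : String) : Decidable (Spec_extract_doc_type text out) := by unfold Spec_extract_doc_type; infer_instance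

-- ===== CLAIM =====
def Claim_equal_extract_doc_type : Prop := ∀ (text : String), Dom_extract_doc_type text → Spec_extract_doc_type text (extract_doc_type text)

-- ===== LEMMAS AND PROOFS =====

-- pointwise: the port's step is an `if … then min … else …` step
lemma pv_step_min (c : Bool) (p b : ℕ) :
    (if p < b ∧ c = true then p else b) = (if c then min b p else b) := by
  by_cases hc : c = true <;> by_cases hp : p < b <;> simp [hc, hp] <;> omega

-- a conditional-min fold is a fold of `min` over the selected values
lemma pv_fold_to_min {β : Type} (c : β → Bool) (v : β → ℕ) :
    ∀ (l : List β) (b : ℕ),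
      l.foldl (fun b tp => if c tp then min b (v tp) else b) b
        = (l.filterMap (fun tp => if c tp then some (v tp) else none)).foldl min b := by
  intro l
  induction l with
  | nil => intro b; simp
  | cons x xs ih =>
    intro b
    by_cases hx : c x <;> simp [hx, ih]

lemma pv_foldl_min_le_init : ∀ (l : List ℕ) (b : ℕ), l.foldl min b ≤ b := by
  intro l
  induction l with
  | nil => simp
  | cons x xs ih => intro b; exact le_trans (ih _) (min_le_left _ _)

lemma pv_foldl_min_le_mem : ∀ (l : List ℕ) (b a : ℕ), a ∈ l → l.foldl min b ≤ a := by
  intro l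
  induction l with
  | nil => intro b a h; simp at h
  | cons x xs ih =>
    intro b a h
    rcases List.mem_cons.1 h with h | h
    · subst h
      simp only [List.foldl_cons]
      exact le_trans (pv_foldl_min_le_init _ _) (min_le_right _ _)
    · exact ih _ _ h

lemma pv_foldl_min_cases : ∀ (l : List ℕ) (b : ℕ), l.foldl min b = b ∨ l.foldl min b ∈ l := by
  intro l
  induction l with
  | nil => simp
  | cons x xs ih =>
    intro b
    rcases ih (min b x) with h | h
    · rcases le_total b x with hbx | hbx
      · left
        rw [min_eq_left hbx] at h
        simp [List.foldl_cons, min_eq_left hbx, h]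
      · right
        rw [min_eq_right hbx] at h
        simp [List.foldl_cons, min_eq_right hbx, h]
    · exact Or.inr (List.mem_cons_of_mem _ h)

-- folds of `min` over lists with the same elements agree
lemma pv_foldl_min_set_eq (l₁ l₂ : List ℕ) (h : ∀ a, a ∈ l₁ ↔ a ∈ l₂) (b : ℕ) :
    l₁.foldl min b = l₂.foldl min b := by
  apply le_antisymm
  · rcases pv_foldl_min_cases l₂ b with h2 | h2
    · rw [h2]; exact pv_foldl_min_le_init _ _
    · exact pv_foldl_min_le_mem _ _ _ ((h _).2 h2)
  · rcases pv_foldl_min_cases l₁ b with h1 | h1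
    · rw [h1]; exact pv_foldl_min_le_init _ _
    · exact pv_foldl_min_le_mem _ _ _ ((h _).1 h1)

-- the outer fold over positions is a fold of `min` over the flattened match list
lemma pv_outer_flat {β : Type} (g : ℕ → List β) (c : β → ℕ → Bool) (v : β → ℕ) :
    ∀ (ps : List ℕ) (b : ℕ),
      ps.foldl (fun b i => (g i).foldl (fun b tp => if c tp i then min b (v tp) else b) b) b
        = (ps.flatMap (fun i => (g i).filterMap (fun tp => if c tp i then some (v tp) else none))).foldl min b := by
  intro ps
  induction ps with
  | nil => intro b; simp
  | cons p ps ih =>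
    intro b
    simp only [List.foldl_cons, List.flatMap_cons, List.foldl_append, ih,
      pv_fold_to_min (fun tp => c tp p) v (g p) b]

-- occurrence anywhere =占 substring membership, for nonempty keywords
lemma pv_occ_iff (term t : List Char) (hne : term ≠ []) :
    (∃ i, i ∈ List.range t.length ∧ PySem.Chars.startswith (t.drop i) term = true)
      ↔ PySem.Chars.isIn term t = true := by
  rw [← PySem.Chars.exists_prefix_drop_iff_isIn]
  constructor
  · rintro ⟨i, _, hs⟩
    exact ⟨i, (PySem.Chars.startswith_iff _ _).1 hs⟩
  · rintro ⟨j, hj⟩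
    by_cases hlt : j < t.length
    · exact ⟨j, List.mem_range.2 hlt, (PySem.Chars.startswith_iff _ _).2 hj⟩
    · exfalso
      have : t.drop j = [] := List.drop_eq_nil_of_le (le_of_not_gt hlt)
      rw [this] at hj
      exact hne (List.prefix_nil.1 hj)


lemma pv_terms_ne : ∀ tp ∈ pvTERMS, tp.1.toList ≠ [] := by decide

-- scan = conditional-min fold over terms with isIn conditions
lemma pv_scan_char (t : List Char) :
    pvScanBest t
      = pvTERMS.foldl (fun b tp => if PySem.Chars.isIn tp.1.toList t then min b tp.2 else b) 10 := by
  unfold pvScanBest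
  simp only [pv_step_min]
  rw [pv_outer_flat (fun _ => pvTERMS)
        (fun tp i => PySem.Chars.startswith (t.drop i) tp.1.toList) (fun tp => tp.2)]
  have h2 : pvTERMS.foldl (fun b tp => if PySem.Chars.isIn tp.1.toList t then min b tp.2 else b) 10
      = (pvTERMS.filterMap (fun tp => if PySem.Chars.isIn tp.1.toList t then some tp.2 else none)).foldl min 10 :=
    pv_fold_to_min _ _ pvTERMS 10
  rw [h2]
  show List.foldl min 10 _ = List.foldl min 10 _
  apply pv_foldl_min_set_eq
  intro a
  simp only [List.mem_flatMap, List.mem_filterMap]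
  constructor
  · rintro ⟨i, hi, tp, htp, hsome⟩
    refine ⟨tp, htp, ?_⟩
    by_cases hc : PySem.Chars.startswith (t.drop i) tp.1.toList = true
    · have hin : PySem.Chars.isIn tp.1.toList t = true :=
        (pv_occ_iff tp.1.toList t (pv_terms_ne tp htp)).1 ⟨i, hi, hc⟩
      simpa [hc, hin] using hsome
    · simp [hc] at hsome
  · rintro ⟨tp, htp, hsome⟩
    by_cases hin : PySem.Chars.isIn tp.1.toList t = true
    · obtain ⟨i, hi, hc⟩ := (pv_occ_iff tp.1.toList t (pv_terms_ne tp htp)).2 hin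
      exact ⟨i, hi, tp, htp, by simpa [hc, hin] using hsome⟩
    · simp [hin] at hsome


lemma pv_group (q : String → Bool) (k : ℕ) :
    ∀ (ss : List String) (b : ℕ),
      (ss.map (fun s => (s, k))).foldl (fun b tp => if q tp.1 then min b tp.2 else b) b
        = if ss.any q then min b k else b := by
  intro ss
  induction ss with
  | nil => intro b; simp
  | cons s ss ih =>
    intro b
    by_cases h : q s <;> cases hA : ss.any q <;>
      simp [h, hA, ih]

lemma pv_alt_char (text : String) :
    extract_doc_type_alt text
      = pvLABELS.getD
          (pvTERMS.foldl
            (fun b tp => if PySem.Str.isIn tp.1 (PySem.Str.lower text) then min b tp.2 else b) 10) "" := by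
  unfold extract_doc_type_alt
  rw [pv_scan_char]
  have hfun : (fun (b : ℕ) (tp : String × ℕ) =>
        if PySem.Chars.isIn tp.1.toList ((PySem.Str.lower text).toList) then min b tp.2 else b)
      = (fun (b : ℕ) (tp : String × ℕ) =>
        if PySem.Str.isIn tp.1 (PySem.Str.lower text) then min b tp.2 else b) := by
    funext b tp
    simp [PySem.Str.isIn_eq]
  rw [hfun]



-- the conditional-min cascade over the ten rule booleans
def pvMinChain (a0 a1 a2 a3 a4 a5 a6 a7 a8 a9 : Bool) : ℕ :=
  let n0 := if a0 then min 10 0 else 10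
  let n1 := if a1 then min n0 1 else n0
  let n2 := if a2 then min n1 2 else n1
  let n3 := if a3 then min n2 3 else n2
  let n4 := if a4 then min n3 4 else n3
  let n5 := if a5 then min n4 5 else n4
  let n6 := if a6 then min n5 6 else n5
  let n7 := if a7 then min n6 7 else n6
  let n8 := if a8 then min n7 8 else n7
  let n9 := if a9 then min n8 9 else n8
  n9

lemma pv_fold_rules (q : String → Bool) :
    pvTERMS.foldl (fun b tp => if q tp.1 then min b tp.2 else b) 10
      = pvMinChain (["10-k", "annual report", "form 10-k"].any q) (["10-q", "quarterly report", "form 10-q"].any q) (["8-k", "current report", "form 8-k"].any q) (["proxy", "def 14a"].any q) (["risk factor", "risks"].any q) (["management discussion", "md&a", "management's discussion"].any q) (["financial statement", "balance sheet", "income statement"].any q) (["notes to", "footnote"].any q) (["business overview", "description of business"].any q) (["forward-looking", "outlook", "guidance"].any q) := by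
  have hT : pvTERMS = (["10-k", "annual report", "form 10-k"].map (fun s => (s, 0))) ++ (["10-q", "quarterly report", "form 10-q"].map (fun s => (s, 1))) ++ (["8-k", "current report", "form 8-k"].map (fun s => (s, 2))) ++ (["proxy", "def 14a"].map (fun s => (s, 3))) ++ (["risk factor", "risks"].map (fun s => (s, 4))) ++ (["management discussion", "md&a", "management's discussion"].map (fun s => (s, 5))) ++ (["financial statement", "balance sheet", "income statement"].map (fun s => (s, 6))) ++ (["notes to", "footnote"].map (fun s => (s, 7))) ++ (["business overview", "description of business"].map (fun s => (s, 8))) ++ (["forward-looking", "outlook", "guidance"].map (fun s => (s, 9))) := by rfl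
  rw [hT]
  simp only [List.foldl_append]
  rw [pv_group q 0]
  rw [pv_group q 1]
  rw [pv_group q 2]
  rw [pv_group q 3]
  rw [pv_group q 4]
  rw [pv_group q 5]
  rw [pv_group q 6]
  rw [pv_group q 7]
  rw [pv_group q 8]
  rw [pv_group q 9]
  rfl

lemma pv_alt_char2 (text : String) :
    extract_doc_type_alt text
      = pvLABELS.getD (pvMinChain
          (["10-k", "annual report", "form 10-k"].any fun term => PySem.Str.isIn term (PySem.Str.lower text)) (["10-q", "quarterly report", "form 10-q"].any fun term => PySem.Str.isIn term (PySem.Str.lower text)) (["8-k", "current report", "form 8-k"].any fun term => PySem.Str.isIn term (PySem.Str.lower text)) (["proxy", "def 14a"].any fun term => PySem.Str.isIn term (PySem.Str.lower text)) (["risk factor", "risks"].any fun term => PySem.Str.isIn term (PySem.Str.lower text)) (["management discussion", "md&a", "management's discussion"].any fun term => PySem.Str.isIn term (PySem.Str.lower text)) (["financial statement", "balance sheet", "income statement"].any fun term => PySem.Str.isIn term (PySem.Str.lower text)) (["notes to", "footnote"].any fun term => PySem.Str.isIn term (PySem.Str.lower text)) (["business overview", "description of business"].any fun term => PySem.Str.isIn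 term (PySem.Str.lower text)) (["forward-looking", "outlook", "guidance"].any fun term => PySem.Str.isIn term (PySem.Str.lower text))) "" := by
  have h := pv_fold_rules (fun term => PySem.Str.isIn term (PySem.Str.lower text))
  rw [pv_alt_char]
  exact congrArg (fun n => pvLABELS.getD n "") h

lemma pv_endgame : ∀ (a0 a1 a2 a3 a4 a5 a6 a7 a8 a9 : Bool),
    (if a0 then "sec_10k"
     else if a1 then "sec_10q"
     else if a2 then "sec_8k"
     else if a3 then "sec_proxy"
     else if a4 then "risk_factors"
     else if a5 then "mda_section"
     else if a6 then "financial_statements"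
     else if a7 then "financial_notes"
     else if a8 then "business_description"
     else if a9 then "forward_looking"
     else "general_section")
      = pvLABELS.getD (pvMinChain a0 a1 a2 a3 a4 a5 a6 a7 a8 a9) "" := by decide

theorem pv_main : ∀ (text : String), extract_doc_type text = extract_doc_type_alt text := by
  intro text
  rw [pv_alt_char2]
  unfold extract_doc_type
  exact pv_endgame
    (["10-k", "annual report", "form 10-k"].any fun term => PySem.Str.isIn term (PySem.Str.lower text)) (["10-q", "quarterly report", "form 10-q"].any fun term => PySem.Str.isIn term (PySem.Str.lower text)) (["8-k", "current report", "form 8-k"].any fun term => PySem.Str.isIn term (PySem.Str.lower text)) (["proxy", "def 14a"].any fun term => PySem.Str.isIn term (PySem.Str.lower text)) (["risk factor", "risks"].any fun term => PySem.Str.isIn term (PySem.Str.lower text)) (["management discussion", "md&a", "management's discussion"].any fun term => PySem.Str.isIn term (PySem.Str.lower text)) (["financial statement", "balance sheet", "income statement"].any fun term => PySem.Str.isIn term (PySem.Str.lower text)) (["notes to", "footnote"].any fun term => PySem.Str.isIn term (PySem.Str.lower text)) (["business overview", "description of business"].any fun term => PySem.Str.isIn term (PySem.Str.lower text)) (["forward-looking",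 "outlook", "guidance"].any fun term => PySem.Str.isIn term (PySem.Str.lower text))

-- ===== VERDICT =====
theorem extract_doc_type_spec : Claim_equal_extract_doc_type := by
  intro text _
  unfold Spec_extract_doc_type
  exact pv_main text
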